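-- pv_equiv track=rewrite | github.com/Steamky/LabsC | Stady/vrotebal/Дискретка/# возвращает таблицу истинности 2корте.py | convert_term_to_simple_polynom
-- ===== SOURCE A (Python) =====
-- def add_simple_term_to_polynom(polynom, term):
--     # привести терм к полиному без отрицаний
--     for i in range(len(polynom)):
--         if polynom[i] == term:
--             del polynom[i]
--             return
--     polynom.append(term.copy())
--
-- def add_polynoms(polynom1, polynom2):
--     for polynom2_term in polynom2:
--         add_simple_term_to_polynom(polynom1, polynom2_term)
--
-- def convert_term_to_simple_polynom(term):
--     # алгоритм: умножаем очередную переменную на многочлен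
--     #  также складываем многочлены
--     #  индукция по переменным
--     polynom = [[0, 0, 0]]
--     for var in range(3):
--         if term[var] == 1:
--             for t in polynom:
--                 t[var] = 1
--         elif term[var] == -1:
--             polynom2 = [term.copy() for term in polynom]
--             for t in polynom2:
--                 t[var] = 1
--             add_polynoms(polynom, polynom2)
--     return polynom
-- ===== SOURCE B (Python) =====
-- def convert_term_to_simple_polynom(term):
--     base = [1 if term[v] == 1 else 0 for v in range(3)]
--     neg = [v for v in range(3) if term[v] == -1]
--     result = []
--     for mask in range(2 ** len(neg)):
--         monomial = base.copy()
--         for j, v in enumerate(neg):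
--             if (mask >> j) & 1:
--                 monomial[v] = 1
--         result.append(monomial)
--     return result
-- ===== Notes on version B (the rewrite author's own statement) =====
-- stated objective: simpler
-- what changed: B builds the base monomial and the list of negated positions once, then enumerates all subsets of the negated positions in binary-counting order, instead of A's inductive variable-by-variable multiplication with XOR-merge (first-match removal) of monomial lists.
import Mathlib
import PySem

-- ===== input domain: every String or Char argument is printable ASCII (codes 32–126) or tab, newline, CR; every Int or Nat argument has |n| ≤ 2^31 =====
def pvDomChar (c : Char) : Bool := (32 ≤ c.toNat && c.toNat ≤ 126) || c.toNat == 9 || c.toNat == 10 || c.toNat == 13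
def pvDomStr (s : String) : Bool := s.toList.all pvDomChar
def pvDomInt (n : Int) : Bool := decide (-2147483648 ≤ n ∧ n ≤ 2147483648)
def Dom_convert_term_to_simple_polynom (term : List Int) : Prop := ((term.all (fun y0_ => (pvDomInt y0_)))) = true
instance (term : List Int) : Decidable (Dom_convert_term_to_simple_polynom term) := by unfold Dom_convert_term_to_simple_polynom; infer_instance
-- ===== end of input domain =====

-- B enumerates the monomials of the Zhegalkin expansion directly as all subsets of the
-- negated positions (binary counting, first negated variable = least-significant bit),
-- instead of A's inductive multiply-and-XOR-merge over the variables; objective: simpler.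


-- ===== PORT A =====
-- first-match removal: Python's scan over range(len(polynom)) with `del polynom[i]; return`
def add_simple_term_to_polynom (polynom : List (List Int)) (term : List Int) : List (List Int) :=
  match polynom with
  | [] => [term]
  | p :: ps => if p = term then ps else p :: add_simple_term_to_polynom ps term

def add_polynoms (polynom1 : List (List Int)) (polynom2 : List (List Int)) : List (List Int) :=
  polynom2.foldl add_simple_term_to_polynom polynom1

def convert_term_to_simple_polynom (term : List Int) : List (List Int) :=
  (List.range 3).foldl (fun (polynom : List (List Int)) (var : Nat) =>
    if (PySem.List.pyGet? term (var : Int)).getD 0 = 1 then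
      polynom.map (fun t => t.set var 1)
    else if (PySem.List.pyGet? term (var : Int)).getD 0 = -1 then
      let polynom2 := polynom.map (fun t => t.set var 1)
      add_polynoms polynom polynom2
    else polynom) [[0, 0, 0]]

-- ===== PORT B =====
def convert_term_to_simple_polynom_alt (term : List Int) : List (List Int) :=
  let base := (List.range 3).map
    (fun (v : Nat) => if (PySem.List.pyGet? term (v : Int)).getD 0 = 1 then (1 : Int) else 0)
  let neg := (List.range 3).filter
    (fun (v : Nat) => (PySem.List.pyGet? term (v : Int)).getD 0 = -1)
  (List.range (2 ^ neg.length)).foldl (fun result mask =>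
    let monomial := neg.zipIdx.foldl
      (fun m jv => if (mask >>> jv.2) % 2 = 1 then m.set jv.1 1 else m) base
    result ++ [monomial]) []

-- ===== PRECONDITION & SPEC =====
-- Python A (and B) raises IndexError when len(term) < 3
def Pre_convert_term_to_simple_polynom (term : List Int) : Prop := 3 ≤ term.length
instance (term : List Int) : Decidable (Pre_convert_term_to_simple_polynom term) := by
  unfold Pre_convert_term_to_simple_polynom; infer_instance
def pvWitness_convert_term_to_simple_polynom : List Int := [1, -1, 0]

def Spec_convert_term_to_simple_polynom (term : List Int) (out : List (List Int)) : Prop := out = convert_term_to_simple_polynom_alt term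
instance (term : List Int) (out : List (List Int)) : Decidable (Spec_convert_term_to_simple_polynom term out) := by unfold Spec_convert_term_to_simple_polynom; infer_instance

-- ===== CLAIM (what is proved, stated in full; the proofs are below) =====
def Claim_equal_convert_term_to_simple_polynom : Prop := ∀ (term : List Int), Dom_convert_term_to_simple_polynom term → Pre_convert_term_to_simple_polynom term → Spec_convert_term_to_simple_polynom term (convert_term_to_simple_polynom term)

-- ===== LEMMAS AND PROOFS =====
-- proof-only helper: the value class of a trit (1, -1, or "anything else" ~ 0);
-- both programs inspect term[v] only through the comparisons `= 1` and `= -1`.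
def pvNorm (x : Int) : Int := if x = 1 then 1 else if x = -1 then -1 else 0

lemma pvNorm_eq_one (x : Int) : (pvNorm x = 1) ↔ (x = 1) := by
  unfold pvNorm; split_ifs with h h' <;> simp_all

lemma pvNorm_eq_negone (x : Int) : (pvNorm x = -1) ↔ (x = -1) := by
  unfold pvNorm; split_ifs with h h' <;> simp_all

lemma pvNorm_mem (x : Int) : pvNorm x ∈ ([1, -1, 0] : List Int) := by
  unfold pvNorm; split_ifs <;> simp

lemma conv_norm (a b c : Int) (rest : List Int) :
    convert_term_to_simple_polynom (a :: b :: c :: rest)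
      = convert_term_to_simple_polynom [pvNorm a, pvNorm b, pvNorm c] := by
  simp [convert_term_to_simple_polynom, List.range_succ,
    pvNorm_eq_one, pvNorm_eq_negone]

lemma alt_norm (a b c : Int) (rest : List Int) :
    convert_term_to_simple_polynom_alt (a :: b :: c :: rest)
      = convert_term_to_simple_polynom_alt [pvNorm a, pvNorm b, pvNorm c] := by
  simp [convert_term_to_simple_polynom_alt, List.range_succ,
    List.filter_cons, List.filter_nil, pvNorm_eq_one, pvNorm_eq_negone]

lemma concrete_case (x y z : Int) (hx : x ∈ ([1, -1, 0] : List Int))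
    (hy : y ∈ ([1, -1, 0] : List Int)) (hz : z ∈ ([1, -1, 0] : List Int)) :
    convert_term_to_simple_polynom [x, y, z]
      = convert_term_to_simple_polynom_alt [x, y, z] := by
  fin_cases hx <;> fin_cases hy <;> fin_cases hz <;> rfl

-- ===== VERDICT (by name: the statement is the Claim_ definition above) =====
theorem convert_term_to_simple_polynom_spec : Claim_equal_convert_term_to_simple_polynom := by
  intro term _ hpre
  unfold Pre_convert_term_to_simple_polynom at hpre
  match term, hpre with
  | a :: b :: c :: rest, _ =>
    exact (conv_norm a b c rest).trans
      ((concrete_case _ _ _ (pvNorm_mem a) (pvNorm_mem b) (pvNorm_mem c)).trans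
        (alt_norm a b c rest).symm)
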